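-- pv_equiv track=rewrite | github.com/grvdshwl/TechMastery | DSA/Problems/Data structures/Greedy/Question 24/index.py | arrange_seats
-- ===== SOURCE A (Python) =====
-- def arrange_seats(reserved_seats, n):
--     seat_map = {}
--
--     for row, col in reserved_seats:
--         cols = seat_map.get(row, set())
--         cols.add(col)
--         seat_map[row] = cols
--
--     result = (n - len(seat_map)) * 2
--
--     for cols in seat_map.values():
--         isFirstFree = not any(col in cols for col in range(2, 6))
--         isLastFree = not any(col in cols for col in range(6, 10))
--         isMidFree = not any(col in cols for col in range(4, 8))
--
--         result += max(isFirstFree + isLastFree, isMidFree)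
--
--     return result
-- ===== SOURCE B (Python) =====
-- def arrange_seats(reserved_seats, n):
--     LEFT, MID, RIGHT = 0b0000111100, 0b0011110000, 0b1111000000
--
--     def loss(mask):
--         groups = (mask & LEFT == 0) + (mask & RIGHT == 0)
--         if groups == 0 and mask & MID == 0:
--             groups = 1
--         return 2 - groups
--
--     pairs = sorted(((row, 1 << col) for row, col in reserved_seats if 2 <= col <= 9),
--                    key=lambda rb: rb[0])
--     total = 2 * n
--     prev = None
--     mask = 0
--     for row, bit in pairs:
--         if row != prev:
--             if prev is not None:
--                 total -= loss(mask)
--             prev = row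
--             mask = 0
--         mask |= bit
--     if prev is not None:
--         total -= loss(mask)
--     return total
-- ===== Notes on version B (the rewrite author's own statement) =====
-- stated objective: alternative
-- what changed: B sorts the reserved (row, 1<<col) bit pairs by row and makes one run-scan over the sorted list, OR-ing a bitmask per run and subtracting a per-row loss from 2*n via constant bitwise tests, instead of A's dict of per-row column sets re-scanned by three range-membership loops.
import Mathlib
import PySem

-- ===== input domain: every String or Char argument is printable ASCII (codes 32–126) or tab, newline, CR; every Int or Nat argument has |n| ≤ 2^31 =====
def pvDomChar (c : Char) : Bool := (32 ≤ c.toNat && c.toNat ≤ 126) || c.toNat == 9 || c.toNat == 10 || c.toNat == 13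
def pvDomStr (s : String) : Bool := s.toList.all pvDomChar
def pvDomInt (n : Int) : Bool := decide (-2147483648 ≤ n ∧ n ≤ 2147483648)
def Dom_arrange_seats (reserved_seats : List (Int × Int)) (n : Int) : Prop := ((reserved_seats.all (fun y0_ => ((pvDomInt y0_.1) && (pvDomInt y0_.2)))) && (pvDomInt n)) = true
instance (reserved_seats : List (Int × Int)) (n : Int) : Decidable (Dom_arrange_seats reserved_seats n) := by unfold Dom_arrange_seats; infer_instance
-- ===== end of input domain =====

-- B sorts the reserved (row, 1<<col) bit pairs by row and run-scans them once, OR-ing a per-run bitmask and subtracting a per-row loss from 2*n via bitwise tests, instead of A's dict of per-row column sets re-scanned by three range loops; alternative algorithm, similar cost.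


-- ===== PORT A =====
def arrange_seats (reserved_seats : List (Int × Int)) (n : Int) : Int :=
  let seat_map : PySem.Dict Int (PySem.Set Int) :=
    reserved_seats.foldl (fun d p =>
      let cols := d.getD p.1 PySem.Set.empty
      d.insert p.1 (PySem.Set.add cols p.2)) PySem.Dict.empty
  let result := (n - (seat_map.size : Int)) * 2
  seat_map.values.foldl (fun result cols =>
    let isFirstFree := !((PySem.List.pyRange 2 6 1).any (fun col => PySem.Set.contains cols col))
    let isLastFree := !((PySem.List.pyRange 6 10 1).any (fun col => PySem.Set.contains cols col))
    let isMidFree := !((PySem.List.pyRange 4 8 1).any (fun col => PySem.Set.contains cols col))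
    result + max ((if isFirstFree then (1 : Int) else 0) + (if isLastFree then (1 : Int) else 0))
                 (if isMidFree then (1 : Int) else 0)) result

-- ===== PORT B =====
-- loss(mask) of Source B: Python bool+bool arithmetic written with explicit if-then-else
def pvLoss (mask : Int) : Int :=
  let groups := (if PySem.Int.band mask 60 = 0 then (1 : Int) else 0) +
                (if PySem.Int.band mask 960 = 0 then (1 : Int) else 0)
  let groups := if groups = 0 ∧ PySem.Int.band mask 240 = 0 then 1 else groups
  2 - groups

-- '1 << col' is '(1 : Int) <<< col.toNat'; exact here since the filter guarantees 2 ≤ col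
def pvBit (c : Int) : Int := (1 : Int) <<< c.toNat

def arrange_seats_alt (reserved_seats : List (Int × Int)) (n : Int) : Int :=
  let pairs := PySem.List.sorted
    ((reserved_seats.filter (fun p => decide (2 ≤ p.2 ∧ p.2 ≤ 9))).map
      (fun p => (p.1, pvBit p.2)))
    (fun rb => rb.1) false
  let st := pairs.foldl (fun (st : Int × Option Int × Int) rb =>
      let total := st.1
      let prev := st.2.1
      let mask := st.2.2
      let s' : Int × Option Int × Int :=
        if some rb.1 ≠ prev then
          ((match prev with
            | some _ => total - pvLoss mask
            | none => total), some rb.1, (0 : Int))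
        else (total, prev, mask)
      (s'.1, s'.2.1, PySem.Int.bor s'.2.2 rb.2)) (2 * n, (none : Option Int), (0 : Int))
  match st.2.1 with
  | some _ => st.1 - pvLoss st.2.2
  | none => st.1

-- ===== PRECONDITION & SPEC =====
def Spec_arrange_seats (reserved_seats : List (Int × Int)) (n : Int) (out : Int) : Prop := out = arrange_seats_alt reserved_seats n
instance (reserved_seats : List (Int × Int)) (n : Int) (out : Int) : Decidable (Spec_arrange_seats reserved_seats n out) := by unfold Spec_arrange_seats; infer_instance

-- ===== CLAIM (what is proved, stated in full; the proofs are below) =====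
def Claim_equal_arrange_seats : Prop := ∀ (reserved_seats : List (Int × Int)) (n : Int), Dom_arrange_seats reserved_seats n → Spec_arrange_seats reserved_seats n (arrange_seats reserved_seats n)

-- ===== LEMMAS AND PROOFS =====

-- second components of the pairs whose first component is r (a row's columns / a row's bits)
def pvRow (s : List (Int × Int)) (r : Int) : List Int :=
  (s.filter (fun p => p.1 == r)).map (·.2)

-- OR-fold of a list of values onto an initial mask
def pvMask (m : Int) (bs : List Int) : Int := bs.foldl PySem.Int.bor m

def pvNatBit (c : Int) : Nat := 1 <<< c.toNat

-- per-row loss of A's score, phrased on the row's plain column list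
def pvBlocked (cs : List Int) (a b : Int) : Bool := cs.any (fun c => decide (a ≤ c ∧ c < b))
def pvLossC (cs : List Int) : Int :=
  2 - max ((if pvBlocked cs 2 6 then (0 : Int) else 1) + (if pvBlocked cs 6 10 then (0 : Int) else 1))
          (if pvBlocked cs 4 8 then (0 : Int) else 1)

-- sum of per-run losses of a (row, bit) list, one term per distinct row
def pvLossSum : List (Int × Int) → Int
  | [] => 0
  | (r, b) :: t =>
      pvLoss (pvMask b (pvRow t r)) + pvLossSum (t.filter (fun q => !(q.1 == r)))
termination_by s => s.length
decreasing_by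
  simp only [List.length_cons, List.length_unattach]
  exact Nat.lt_succ_of_le (le_trans (List.length_filter_le _ _) (le_of_eq List.length_attach))

-- the finishing step of B's loop (flush of the last run)
def pvFin (st : Int × Option Int × Int) : Int :=
  match st.2.1 with
  | some _ => st.1 - pvLoss st.2.2
  | none => st.1

theorem pv_zero_bor (x : Int) : PySem.Int.bor 0 x = x := by
  rw [PySem.Int.bor_comm]; exact PySem.Int.bor_zero x

theorem pvBit_cast (c : Int) : pvBit c = ((pvNatBit c : Nat) : Int) := by
  simp [pvBit, pvNatBit, Int.natCast_shiftLeft]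

theorem pvBit_nonneg (c : Int) : 0 ≤ pvBit c := by
  rw [pvBit_cast]; exact Int.natCast_nonneg _

theorem pv_nat_zero_iff (x : Nat) : x = 0 ↔ ∀ i, x.testBit i = false :=
  ⟨fun h i => by simp [h], fun h => Nat.eq_of_testBit_eq fun i => by simp [h i]⟩

theorem pv_or_and_zero (a b t : Nat) :
    ((a ||| b) &&& t = 0) ↔ (a &&& t = 0 ∧ b &&& t = 0) := by
  rw [pv_nat_zero_iff, pv_nat_zero_iff, pv_nat_zero_iff]
  simp only [Nat.testBit_and, Nat.testBit_or]
  constructor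
  · intro h
    refine ⟨fun i => ?_, fun i => ?_⟩ <;>
      (have hi := h i
       cases hta : a.testBit i <;> cases htb : b.testBit i <;> cases htt : t.testBit i <;> simp_all)
  · rintro ⟨h1, h2⟩ i
    have hi1 := h1 i
    have hi2 := h2 i
    cases hta : a.testBit i <;> cases htb : b.testBit i <;> cases htt : t.testBit i <;> simp_all

theorem pv_nat_foldl_or (bs : List Nat) : ∀ a : Nat,
    bs.foldl (· ||| ·) a = a ||| bs.foldl (· ||| ·) 0 := by
  induction bs with
  | nil => intro a; simp
  | cons b bs ih =>
    intro a
    rw [List.foldl_cons, List.foldl_cons, ih (a ||| b), ih (0 ||| b), Nat.zero_or, Nat.lor_assoc]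

theorem pv_natmask_band (t : Nat) (bs : List Nat) :
    (bs.foldl (· ||| ·) 0 &&& t = 0) ↔ ∀ b ∈ bs, b &&& t = 0 := by
  induction bs with
  | nil => simp
  | cons b bs ih =>
    rw [List.foldl_cons, Nat.zero_or, pv_nat_foldl_or, pv_or_and_zero]
    simp [ih]

theorem pv_mask_natCast (bs : List Nat) : ∀ m : Nat,
    pvMask (m : Int) (bs.map (fun b : Nat => (b : Int))) = ((bs.foldl (· ||| ·) m : Nat) : Int) := by
  induction bs with
  | nil => intro m; rfl
  | cons b bs ih =>
    intro m
    simp only [List.map_cons, pvMask, List.foldl_cons, PySem.Int.bor_natCast]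
    have h := ih (m ||| b)
    simpa [pvMask] using h

theorem pv_mask0_perm {bs cs : List Int} (h : bs.Perm cs) (hb : ∀ x ∈ bs, 0 ≤ x) :
    pvMask 0 bs = pvMask 0 cs := by
  have hcs : ∀ x ∈ cs, 0 ≤ x := fun x hx => hb x (h.mem_iff.mpr hx)
  have hbs2 : (bs.map Int.toNat).map (fun b : Nat => (b : Int)) = bs := by
    rw [List.map_map]
    conv_rhs => rw [← List.map_id bs]
    exact List.map_congr_left fun x hx => Int.toNat_of_nonneg (hb x hx)
  have hcs2 : (cs.map Int.toNat).map (fun b : Nat => (b : Int)) = cs := by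
    rw [List.map_map]
    conv_rhs => rw [← List.map_id cs]
    exact List.map_congr_left fun x hx => Int.toNat_of_nonneg (hcs x hx)
  have hrc : RightCommutative (fun a b : Nat => a ||| b) :=
    ⟨fun b a₁ a₂ => by rw [Nat.lor_assoc, Nat.lor_comm a₁ a₂, ← Nat.lor_assoc]⟩
  have hfold : (bs.map Int.toNat).foldl (· ||| ·) 0 = (cs.map Int.toNat).foldl (· ||| ·) 0 :=
    @List.Perm.foldl_eq _ _ _ _ _ hrc (h.map Int.toNat) 0
  calc pvMask 0 bs = pvMask ((0 : Nat) : Int) ((bs.map Int.toNat).map (fun b : Nat => (b : Int))) := by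
        rw [hbs2]; norm_num
    _ = (((bs.map Int.toNat).foldl (· ||| ·) 0 : Nat) : Int) := pv_mask_natCast _ 0
    _ = (((cs.map Int.toNat).foldl (· ||| ·) 0 : Nat) : Int) := by rw [hfold]
    _ = pvMask ((0 : Nat) : Int) ((cs.map Int.toNat).map (fun b : Nat => (b : Int))) := (pv_mask_natCast _ 0).symm
    _ = pvMask 0 cs := by rw [hcs2]; norm_num

-- the three bit tests of one column's bit, for columns in 2..9
theorem pv_bit_left (c : Int) (h2 : 2 ≤ c) (h9 : c ≤ 9) :
    (pvNatBit c &&& 60 = 0) ↔ ¬(2 ≤ c ∧ c < 6) := by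
  interval_cases c <;> decide

theorem pv_bit_mid (c : Int) (h2 : 2 ≤ c) (h9 : c ≤ 9) :
    (pvNatBit c &&& 240 = 0) ↔ ¬(4 ≤ c ∧ c < 8) := by
  interval_cases c <;> decide

theorem pv_bit_right (c : Int) (h2 : 2 ≤ c) (h9 : c ≤ 9) :
    (pvNatBit c &&& 960 = 0) ↔ ¬(6 ≤ c ∧ c < 10) := by
  interval_cases c <;> decide

-- band test of the row's mask against one seat group, as a statement about the plain column list
theorem pv_band_blocked (cs : List Int) (t : Nat) (a b : Int)
    (hab : ∀ c : Int, (a ≤ c ∧ c < b) → (2 ≤ c ∧ c ≤ 9))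
    (hbit : ∀ c : Int, 2 ≤ c → c ≤ 9 → ((pvNatBit c &&& t = 0) ↔ ¬(a ≤ c ∧ c < b))) :
    (PySem.Int.band (pvMask 0 ((cs.filter (fun c => decide (2 ≤ c ∧ c ≤ 9))).map pvBit)) ((t : Nat) : Int) = 0)
      ↔ (pvBlocked cs a b = false) := by
  set ds := cs.filter (fun c => decide (2 ≤ c ∧ c ≤ 9)) with hds
  have hmem : ∀ c ∈ ds, 2 ≤ c ∧ c ≤ 9 := by
    intro c hc
    rw [hds, List.mem_filter] at hc
    exact of_decide_eq_true hc.2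
  have hmap : ds.map pvBit = (ds.map pvNatBit).map (fun x : Nat => (x : Int)) := by
    rw [List.map_map]
    exact List.map_congr_left fun c _ => pvBit_cast c
  have hmask : pvMask 0 (ds.map pvBit) = (((ds.map pvNatBit).foldl (· ||| ·) 0 : Nat) : Int) := by
    rw [hmap]
    have h0 := pv_mask_natCast (ds.map pvNatBit) 0
    simpa using h0
  rw [hmask, PySem.Int.band_natCast, Nat.cast_eq_zero, pv_natmask_band]
  constructor
  · intro h
    rw [Bool.eq_false_iff]
    intro hblk
    rw [pvBlocked, List.any_eq_true] at hblk
    obtain ⟨c, hc, hcab⟩ := hblk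
    have hcab' := of_decide_eq_true hcab
    have hrel := hab c hcab'
    have hcds : c ∈ ds := by
      rw [hds, List.mem_filter]
      exact ⟨hc, decide_eq_true hrel⟩
    have hz := h (pvNatBit c) (List.mem_map_of_mem hcds)
    exact ((hbit c hrel.1 hrel.2).mp hz) hcab'
  · intro h x hx
    rw [List.mem_map] at hx
    obtain ⟨c, hc, rfl⟩ := hx
    have hrel := hmem c hc
    rw [hbit c hrel.1 hrel.2]
    intro hcab
    have hccs : c ∈ cs := by
      rw [hds, List.mem_filter] at hc
      exact hc.1
    have hbt : pvBlocked cs a b = true := by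
      rw [pvBlocked, List.any_eq_true]
      exact ⟨c, hccs, decide_eq_true hcab⟩
    rw [h] at hbt
    exact Bool.false_ne_true hbt

-- the per-row bridge: B's loss of the row's bitmask = A's loss of the row's column list
theorem pv_loss_bridge (cs : List Int) :
    pvLoss (pvMask 0 ((cs.filter (fun c => decide (2 ≤ c ∧ c ≤ 9))).map pvBit)) = pvLossC cs := by
  have hL := pv_band_blocked cs 60 2 6 (fun c hc => ⟨hc.1, by omega⟩) pv_bit_left
  have hM := pv_band_blocked cs 240 4 8 (fun c hc => ⟨by omega, by omega⟩) pv_bit_mid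
  have hR := pv_band_blocked cs 960 6 10 (fun c hc => ⟨by omega, by omega⟩) pv_bit_right
  rw [show (((60 : Nat) : Int)) = (60 : Int) from by norm_num] at hL
  rw [show (((240 : Nat) : Int)) = (240 : Int) from by norm_num] at hM
  rw [show (((960 : Nat) : Int)) = (960 : Int) from by norm_num] at hR
  set M := pvMask 0 ((cs.filter (fun c => decide (2 ≤ c ∧ c ≤ 9))).map pvBit) with hMdef
  simp only [pvLoss, pvLossC]
  simp only [hL, hM, hR]
  cases hb1 : pvBlocked cs 2 6 <;> cases hb2 : pvBlocked cs 4 8 <;> cases hb3 : pvBlocked cs 6 10 <;>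
    simp

-- ===== A-side characterisation =====

theorem pvA_getD (l : List (Int × Int)) : ∀ (d : PySem.Dict Int (PySem.Set Int)) (r : Int),
    (l.foldl (fun d p => d.insert p.1 (PySem.Set.add (d.getD p.1 PySem.Set.empty) p.2)) d).getD r PySem.Set.empty
      = PySem.Set.update (d.getD r PySem.Set.empty) (pvRow l r) := by
  induction l with
  | nil => intro d r; rfl
  | cons p t ih =>
    intro d r
    rw [List.foldl_cons, ih]
    by_cases h : p.1 = r
    · subst h
      rw [PySem.Dict.getD_insert_self]
      have hrow : pvRow (p :: t) p.1 = p.2 :: pvRow t p.1 := by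
        simp [pvRow]
      rw [hrow, PySem.Set.update_cons]
    · rw [PySem.Dict.getD_insert_of_ne _ _ _ (fun he => h he.symm)]
      have hrow : pvRow (p :: t) r = pvRow t r := by
        simp [pvRow, h]
      rw [hrow]

theorem pv_any_range (a b : Int) (cs : List Int) :
    ((PySem.List.pyRange a b 1).any fun col => PySem.Set.contains (PySem.Set.ofList cs) col)
      = pvBlocked cs a b := by
  rw [Bool.eq_iff_iff]
  simp only [List.any_eq_true, PySem.List.mem_pyRange_one, PySem.Set.contains_iff,
    PySem.Set.mem_ofList, pvBlocked, decide_eq_true_eq]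
  constructor
  · rintro ⟨c, ⟨h1, h2⟩, hm⟩
    exact ⟨c, hm, h1, h2⟩
  · rintro ⟨c, hm, h1, h2⟩
    exact ⟨c, ⟨h1, h2⟩, hm⟩

def pvScoreS (cols : PySem.Set Int) : Int :=
  max ((if !((PySem.List.pyRange 2 6 1).any (fun col => PySem.Set.contains cols col)) then (1 : Int) else 0)
      + (if !((PySem.List.pyRange 6 10 1).any (fun col => PySem.Set.contains cols col)) then (1 : Int) else 0))
      (if !((PySem.List.pyRange 4 8 1).any (fun col => PySem.Set.contains cols col)) then (1 : Int) else 0)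

theorem pv_score (cs : List Int) : pvScoreS (PySem.Set.ofList cs) = 2 - pvLossC cs := by
  unfold pvScoreS
  rw [pv_any_range, pv_any_range, pv_any_range]
  cases hb1 : pvBlocked cs 2 6 <;> cases hb2 : pvBlocked cs 4 8 <;> cases hb3 : pvBlocked cs 6 10 <;>
    simp [pvLossC, hb1, hb2, hb3]

theorem pv_sum_two_sub (R : List Int) (g : Int → Int) :
    (R.map (fun r => 2 - g r)).sum = 2 * (R.length : Int) - (R.map g).sum := by
  induction R with
  | nil => simp
  | cons r R ih =>
    simp only [List.map_cons, List.sum_cons, List.length_cons, ih]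
    push_cast
    ring

-- A in closed form: 2n minus the sum of per-row losses over the distinct rows
theorem pvA_eq (l : List (Int × Int)) (n : Int) :
    arrange_seats l n
      = 2 * n - ((PySem.Set.ofList (l.map (·.1))).map (fun r => pvLossC (pvRow l r))).sum := by
  set d := l.foldl (fun d p => d.insert p.1 (PySem.Set.add (d.getD p.1 PySem.Set.empty) p.2))
    (PySem.Dict.empty : PySem.Dict Int (PySem.Set Int)) with hd
  have hA : arrange_seats l n
      = d.values.foldl (fun result cols => result + pvScoreS cols) ((n - (d.size : Int)) * 2) := rfl
  have hkeys : d.keys = PySem.Set.ofList (l.map (·.1)) := by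
    rw [hd, PySem.Dict.keys_foldl_insert_key l (·.1) (fun d p => PySem.Set.add (d.getD p.1 PySem.Set.empty) p.2)]
    rfl
  have hnodup : d.keys.Nodup := by
    rw [hd]
    exact PySem.Dict.nodup_keys_foldl_insert_key l (·.1)
      (fun d p => PySem.Set.add (d.getD p.1 PySem.Set.empty) p.2)
      (PySem.Dict.empty : PySem.Dict Int (PySem.Set Int)) PySem.Dict.nodup_keys_empty
  have hvals : d.values = d.keys.map (fun k => d.getD k PySem.Set.empty) :=
    PySem.Dict.values_eq_map_keys d hnodup _
  have hgetD : ∀ r, d.getD r PySem.Set.empty = PySem.Set.ofList (pvRow l r) := by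
    intro r
    rw [hd, pvA_getD l _ r, PySem.Dict.getD_empty]
    rfl
  have hsize : ((d.size : Nat) : Int) = ((d.keys.length : Nat) : Int) := by
    simp [PySem.Dict.size, PySem.Dict.keys]
  rw [hA, hvals, PySem.List.foldl_add, List.map_map, hsize, hkeys]
  have hmap : ((PySem.Set.ofList (l.map (·.1))).map (pvScoreS ∘ fun k => d.getD k PySem.Set.empty))
      = (PySem.Set.ofList (l.map (·.1))).map (fun r => 2 - pvLossC (pvRow l r)) := by
    refine List.map_congr_left fun r _ => ?_
    simp only [Function.comp, hgetD r]
    exact pv_score (pvRow l r)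
  rw [hmap, pv_sum_two_sub]
  ring

-- ===== B-side characterisation =====

theorem pvB_scan (t : List (Int × Int)) : ∀ (total r m : Int),
    List.Pairwise (fun p q : Int × Int => p.1 ≤ q.1) t → (∀ q ∈ t, r ≤ q.1) →
    pvFin (t.foldl (fun (st : Int × Option Int × Int) rb =>
      let total := st.1
      let prev := st.2.1
      let mask := st.2.2
      let s' : Int × Option Int × Int :=
        if some rb.1 ≠ prev then
          ((match prev with
            | some _ => total - pvLoss mask
            | none => total), some rb.1, (0 : Int))
        else (total, prev, mask)
      (s'.1, s'.2.1, PySem.Int.bor s'.2.2 rb.2)) (total, some r, m))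
      = total - pvLoss (pvMask m (pvRow t r)) - pvLossSum (t.filter (fun q => !(q.1 == r))) := by
  induction t with
  | nil =>
    intro total r m _ _
    simp [pvFin, pvMask, pvRow, pvLossSum]
  | cons q t ih =>
    intro total r m hp hr
    rcases List.pairwise_cons.mp hp with ⟨hq, hp'⟩
    rw [List.foldl_cons]
    by_cases h : q.1 = r
    · have hcond : (some q.1 ≠ some r) = False := by simp [h]
      simp only [hcond, if_false]
      rw [ih total r (PySem.Int.bor m q.2) hp' (fun p hp2 => h ▸ hq p hp2)]
      have hrow : pvRow (q :: t) r = q.2 :: pvRow t r := by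
        simp [pvRow, h]
      have hfil : (q :: t).filter (fun q' => !(q'.1 == r)) = t.filter (fun q' => !(q'.1 == r)) := by
        simp [h]
      rw [hrow, hfil]
      rfl
    · have hcond : (some q.1 ≠ some r) = True := by simp [h]
      simp only [hcond, if_true]
      rw [ih (total - pvLoss m) q.1 (PySem.Int.bor 0 q.2) hp' hq]
      have hfil0 : t.filter (fun p => p.1 == r) = [] := by
        rw [List.filter_eq_nil_iff]
        intro p hp2 hbeq
        have h1 : q.1 ≤ p.1 := hq p hp2
        have h2 : p.1 = r := by simpa using hbeq
        have h3 : r < q.1 := lt_of_le_of_ne (hr q List.mem_cons_self) (fun e => h e.symm)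
        omega
      have hrow : pvRow (q :: t) r = [] := by
        simp [pvRow, h, hfil0]
      have hfilt : t.filter (fun q' => !(q'.1 == r)) = t := by
        rw [List.filter_eq_self]
        intro p hp2
        have h1 : q.1 ≤ p.1 := hq p hp2
        have h3 : r < q.1 := lt_of_le_of_ne (hr q List.mem_cons_self) (fun e => h e.symm)
        have hne : p.1 ≠ r := by omega
        simp [hne]
      have hfil : (q :: t).filter (fun q' => !(q'.1 == r)) = q :: t := by
        simp [h, hfilt]
      rw [hrow, hfil]
      have hsum : pvLossSum (q :: t)
          = pvLoss (pvMask q.2 (pvRow t q.1)) + pvLossSum (t.filter (fun q' => !(q'.1 == q.1))) := by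
        rw [pvLossSum]
      rw [hsum, pv_zero_bor]
      have hm0 : pvMask m ([] : List Int) = m := rfl
      rw [hm0]
      ring

theorem pvB_eq (l : List (Int × Int)) (n : Int) :
    arrange_seats_alt l n
      = 2 * n - pvLossSum (PySem.List.sorted
          ((l.filter (fun p => decide (2 ≤ p.2 ∧ p.2 ≤ 9))).map (fun p => (p.1, pvBit p.2)))
          (fun rb => rb.1) false) := by
  have hdef : arrange_seats_alt l n
      = pvFin ((PySem.List.sorted
          ((l.filter (fun p => decide (2 ≤ p.2 ∧ p.2 ≤ 9))).map (fun p => (p.1, pvBit p.2)))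
          (fun rb => rb.1) false).foldl (fun (st : Int × Option Int × Int) rb =>
        let total := st.1
        let prev := st.2.1
        let mask := st.2.2
        let s' : Int × Option Int × Int :=
          if some rb.1 ≠ prev then
            ((match prev with
              | some _ => total - pvLoss mask
              | none => total), some rb.1, (0 : Int))
          else (total, prev, mask)
        (s'.1, s'.2.1, PySem.Int.bor s'.2.2 rb.2)) (2 * n, (none : Option Int), (0 : Int))) := rfl
  rw [hdef]
  have hpw := PySem.List.sorted_pairwise
    ((l.filter (fun p => decide (2 ≤ p.2 ∧ p.2 ≤ 9))).map (fun p => (p.1, pvBit p.2)))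
    (fun rb => rb.1)
  cases hpairs : PySem.List.sorted
      ((l.filter (fun p => decide (2 ≤ p.2 ∧ p.2 ≤ 9))).map (fun p => (p.1, pvBit p.2)))
      (fun rb => rb.1) false with
  | nil =>
    simp [pvFin, pvLossSum]
  | cons p t =>
    rw [hpairs] at hpw
    rcases List.pairwise_cons.mp hpw with ⟨hq, hp'⟩
    rw [List.foldl_cons]
    have hcond : (some p.1 ≠ (none : Option Int)) = True := by simp
    simp only [hcond, if_true]
    rw [pvB_scan t (2 * n) p.1 (PySem.Int.bor 0 p.2) hp' hq, pv_zero_bor]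
    have hsum : pvLossSum (p :: t)
        = pvLoss (pvMask p.2 (pvRow t p.1)) + pvLossSum (t.filter (fun q' => !(q'.1 == p.1))) := by
      rw [pvLossSum]
    rw [hsum]
    ring

-- pvLossSum as a Finset sum over the distinct rows
theorem pvLossSum_eq_aux : ∀ (N : Nat) (s : List (Int × Int)), s.length ≤ N →
    pvLossSum s = ∑ r ∈ (s.map (·.1)).toFinset, pvLoss (pvMask 0 (pvRow s r)) := by
  intro N
  induction N with
  | zero =>
    intro s hs
    cases s with
    | nil => simp [pvLossSum]
    | cons a t => simp at hs
  | succ N ih =>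
    intro s hs
    match s with
    | [] => simp [pvLossSum]
    | (r, b) :: t =>
      have hlen : (t.filter (fun q => !(q.1 == r))).length ≤ N := by
        have h1 := List.length_filter_le (fun q : Int × Int => !(q.1 == r)) t
        have h2 : t.length + 1 ≤ N + 1 := by simpa using hs
        omega
      have hA : (((r, b) :: t : List (Int × Int)).map (·.1)).toFinset
          = insert r ((t.map (·.1)).toFinset) := by simp
      have hins : insert r ((t.map (·.1)).toFinset)
          = insert r (((t.map (·.1)).toFinset).erase r) := by
        ext x
        simp only [Finset.mem_insert, Finset.mem_erase]
        constructor
        · rintro (rfl | hx)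
          · exact Or.inl rfl
          · by_cases hxr : x = r
            · exact Or.inl hxr
            · exact Or.inr ⟨hxr, hx⟩
        · rintro (rfl | ⟨_, hx⟩)
          · exact Or.inl rfl
          · exact Or.inr hx
      have herase : ((t.map (·.1)).toFinset).erase r
          = ((t.filter (fun q => !(q.1 == r))).map (·.1)).toFinset := by
        ext x
        simp only [Finset.mem_erase, List.mem_toFinset, List.mem_map, List.mem_filter]
        constructor
        · rintro ⟨hxr, q, hq, rfl⟩
          exact ⟨q, ⟨hq, by simpa using hxr⟩, rfl⟩
        · rintro ⟨q, ⟨hq, hne⟩, rfl⟩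
          exact ⟨by simpa using hne, q, hq, rfl⟩
      have hhead : pvMask 0 (pvRow ((r, b) :: t) r) = pvMask b (pvRow t r) := by
        have hc : pvRow ((r, b) :: t) r = b :: pvRow t r := by
          simp [pvRow]
        rw [hc]
        show pvMask (PySem.Int.bor 0 b) (pvRow t r) = _
        rw [pv_zero_bor]
      have htail : ∑ x ∈ ((t.map (·.1)).toFinset).erase r, pvLoss (pvMask 0 (pvRow ((r, b) :: t) x))
          = ∑ x ∈ ((t.filter (fun q => !(q.1 == r))).map (·.1)).toFinset,
              pvLoss (pvMask 0 (pvRow (t.filter (fun q => !(q.1 == r))) x)) := by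
        refine Finset.sum_congr herase fun x hx => ?_
        have hxr : x ≠ r := by
          simp only [List.mem_toFinset, List.mem_map, List.mem_filter] at hx
          obtain ⟨q, ⟨_, hne⟩, rfl⟩ := hx
          simpa using hne
        have hrx : ¬ (r = x) := fun e => hxr e.symm
        have h1 : pvRow ((r, b) :: t) x = pvRow t x := by
          simp [pvRow, hrx]
        have h2 : pvRow (t.filter (fun q => !(q.1 == r))) x = pvRow t x := by
          rw [pvRow, pvRow, List.filter_filter]
          congr 1
          refine List.filter_congr fun q _ => ?_
          by_cases hqx : q.1 = x
          · simp [hqx, hxr]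
          · simp [hqx]
        rw [h1, h2]
      rw [pvLossSum, hA, hins, Finset.sum_insert (Finset.notMem_erase r _), hhead, htail,
        ih (t.filter (fun q => !(q.1 == r))) hlen]

theorem pvLossSum_eq (s : List (Int × Int)) :
    pvLossSum s = ∑ r ∈ (s.map (·.1)).toFinset, pvLoss (pvMask 0 (pvRow s r)) :=
  pvLossSum_eq_aux s.length s le_rfl

-- the row bits of the filtered-and-mapped list are the bits of the row's relevant columns
theorem pv_rowF (l : List (Int × Int)) (r : Int) :
    pvRow ((l.filter (fun p => decide (2 ≤ p.2 ∧ p.2 ≤ 9))).map (fun p => (p.1, pvBit p.2))) r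
      = ((pvRow l r).filter (fun c => decide (2 ≤ c ∧ c ≤ 9))).map pvBit := by
  unfold pvRow
  simp only [List.filter_map, List.map_map, List.filter_filter, Function.comp]
  congr 1
  exact List.filter_congr fun p _ => Bool.and_comm _ _

-- ===== VERDICT (by name: the statement is the Claim_ definition above) =====
theorem arrange_seats_spec : Claim_equal_arrange_seats := by
  intro l n _
  unfold Spec_arrange_seats
  rw [pvA_eq, pvB_eq, pvLossSum_eq]
  congr 1
  have hAsum : ((PySem.Set.ofList (l.map (·.1))).map (fun r => pvLossC (pvRow l r))).sum
      = ∑ r ∈ (l.map (·.1)).toFinset, pvLossC (pvRow l r) := by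
    rw [← List.sum_toFinset _ (PySem.Set.nodup_ofList (l.map (·.1)))]
    congr 1
    ext x
    simp [List.mem_toFinset, PySem.Set.mem_ofList]
  rw [hAsum]
  have hperm := PySem.List.sorted_perm
    ((l.filter (fun p => decide (2 ≤ p.2 ∧ p.2 ≤ 9))).map (fun p => (p.1, pvBit p.2)))
    (fun rb => rb.1) false
  have hnn : ∀ p ∈ (l.filter (fun p => decide (2 ≤ p.2 ∧ p.2 ≤ 9))).map (fun p => (p.1, pvBit p.2)),
      0 ≤ p.2 := by
    intro p hp
    rw [List.mem_map] at hp
    obtain ⟨q, _, rfl⟩ := hp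
    exact pvBit_nonneg q.2
  have hg : ∀ r, pvMask 0 (pvRow (PySem.List.sorted
        ((l.filter (fun p => decide (2 ≤ p.2 ∧ p.2 ≤ 9))).map (fun p => (p.1, pvBit p.2)))
        (fun rb => rb.1) false) r)
      = pvMask 0 (pvRow ((l.filter (fun p => decide (2 ≤ p.2 ∧ p.2 ≤ 9))).map (fun p => (p.1, pvBit p.2))) r) := by
    intro r
    refine pv_mask0_perm ((hperm.filter _).map _) ?_
    intro x hx
    rw [pvRow] at hx
    rw [List.mem_map] at hx
    obtain ⟨q, hq, rfl⟩ := hx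
    exact hnn q (hperm.subset (List.mem_of_mem_filter hq))
  have hts : ((PySem.List.sorted
        ((l.filter (fun p => decide (2 ≤ p.2 ∧ p.2 ≤ 9))).map (fun p => (p.1, pvBit p.2)))
        (fun rb => rb.1) false).map (·.1)).toFinset
      = (((l.filter (fun p => decide (2 ≤ p.2 ∧ p.2 ≤ 9))).map (fun p => (p.1, pvBit p.2))).map (·.1)).toFinset :=
    List.toFinset_eq_of_perm _ _ (hperm.map _)
  have hsub : (((l.filter (fun p => decide (2 ≤ p.2 ∧ p.2 ≤ 9))).map (fun p => (p.1, pvBit p.2))).map (·.1)).toFinset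
      ⊆ (l.map (·.1)).toFinset := by
    intro x hx
    simp only [List.mem_toFinset, List.mem_map, List.mem_filter] at hx ⊢
    obtain ⟨q, hq, rfl⟩ := hx
    obtain ⟨p, hp, rfl⟩ := hq
    exact ⟨p, hp.1, rfl⟩
  have hzero : ∀ x ∈ (l.map (·.1)).toFinset,
      x ∉ (((l.filter (fun p => decide (2 ≤ p.2 ∧ p.2 ≤ 9))).map (fun p => (p.1, pvBit p.2))).map (·.1)).toFinset
      → pvLossC (pvRow l x) = 0 := by
    intro x _ hnx
    have hnorel : ∀ c ∈ pvRow l x, ¬(2 ≤ c ∧ c ≤ 9) := by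
      intro c hc hrel
      rw [pvRow, List.mem_map] at hc
      obtain ⟨p, hp, rfl⟩ := hc
      rw [List.mem_filter] at hp
      apply hnx
      simp only [List.mem_toFinset, List.mem_map, List.mem_filter]
      refine ⟨(p.1, pvBit p.2), ⟨p, ⟨hp.1, decide_eq_true hrel⟩, rfl⟩, ?_⟩
      simpa using hp.2
    have hb1 : pvBlocked (pvRow l x) 2 6 = false := by
      rw [pvBlocked, List.any_eq_false]
      intro c hc
      simp only [decide_eq_true_eq]
      intro hcc
      exact hnorel c hc ⟨hcc.1, by omega⟩
    have hb2 : pvBlocked (pvRow l x) 4 8 = false := by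
      rw [pvBlocked, List.any_eq_false]
      intro c hc
      simp only [decide_eq_true_eq]
      intro hcc
      exact hnorel c hc ⟨by omega, by omega⟩
    have hb3 : pvBlocked (pvRow l x) 6 10 = false := by
      rw [pvBlocked, List.any_eq_false]
      intro c hc
      simp only [decide_eq_true_eq]
      intro hcc
      exact hnorel c hc ⟨by omega, by omega⟩
    simp [pvLossC, hb1, hb2, hb3]
  refine Eq.symm ?_
  calc ∑ r ∈ ((PySem.List.sorted
        ((l.filter (fun p => decide (2 ≤ p.2 ∧ p.2 ≤ 9))).map (fun p => (p.1, pvBit p.2)))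
        (fun rb => rb.1) false).map (·.1)).toFinset,
        pvLoss (pvMask 0 (pvRow (PySem.List.sorted
          ((l.filter (fun p => decide (2 ≤ p.2 ∧ p.2 ≤ 9))).map (fun p => (p.1, pvBit p.2)))
          (fun rb => rb.1) false) r))
      = ∑ r ∈ (((l.filter (fun p => decide (2 ≤ p.2 ∧ p.2 ≤ 9))).map (fun p => (p.1, pvBit p.2))).map (·.1)).toFinset,
          pvLoss (pvMask 0 (pvRow ((l.filter (fun p => decide (2 ≤ p.2 ∧ p.2 ≤ 9))).map (fun p => (p.1, pvBit p.2))) r)) := by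
        rw [hts]
        exact Finset.sum_congr rfl fun r _ => by rw [hg r]
    _ = ∑ r ∈ (((l.filter (fun p => decide (2 ≤ p.2 ∧ p.2 ≤ 9))).map (fun p => (p.1, pvBit p.2))).map (·.1)).toFinset,
          pvLossC (pvRow l r) := by
        refine Finset.sum_congr rfl fun r _ => ?_
        rw [pv_rowF l r, pv_loss_bridge]
    _ = ∑ r ∈ (l.map (·.1)).toFinset, pvLossC (pvRow l r) := Finset.sum_subset hsub hzero
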